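-- pv_equiv track=rewrite | github.com/Enjef/Algo | 1900 - 1999/1961 - Check If String Is a Prefix of Array/1961 - Check If String Is a Prefix of Array.py | isPrefixString_best_speed
-- ===== SOURCE A (Python) =====
-- from typing import List
--
-- def isPrefixString_best_speed(s: str, words: List[str]) -> bool:
--     len_str = len(s)
--     total = 0
--     ss = ''
--     for i in words:
--         total += len(i)
--         ss += i
--         if total >= len_str:
--             break
--     if ss == s:
--         return True
--     else:
--         return False
-- ===== SOURCE B (Python) =====
-- def isPrefixString_best_speed(s, words):
--     i = 0
--     for w in words:
--         if s[i:i+len(w)] != w: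
--             return False
--         i += len(w)
--         if i >= len(s):
--             break
--     return i == len(s)
-- ===== Notes on version B (the rewrite author's own statement) =====
-- stated objective: simpler
-- what changed: Maintains an integer pointer into s and compares each word against the corresponding slice with early exit on the first mismatch, instead of building a growing concatenation and comparing it to s at the end.
import Mathlib
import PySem

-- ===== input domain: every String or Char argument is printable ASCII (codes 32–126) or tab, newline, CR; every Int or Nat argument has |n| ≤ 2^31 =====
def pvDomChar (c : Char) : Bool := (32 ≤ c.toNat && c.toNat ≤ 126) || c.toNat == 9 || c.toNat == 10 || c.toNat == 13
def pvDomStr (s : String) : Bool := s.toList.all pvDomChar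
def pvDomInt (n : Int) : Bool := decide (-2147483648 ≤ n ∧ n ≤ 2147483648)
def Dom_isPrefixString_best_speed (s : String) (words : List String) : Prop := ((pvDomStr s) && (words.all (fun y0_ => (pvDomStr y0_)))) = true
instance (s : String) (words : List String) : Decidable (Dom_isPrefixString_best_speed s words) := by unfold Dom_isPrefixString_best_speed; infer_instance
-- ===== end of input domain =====

-- ===== PORT A =====
-- B changes structure only (pointer into s instead of a growing concatenation); return values are proved equal.
-- A's loop: accumulate total length and concatenation ss, break once total >= len(s); then return ss == s.
def pvALoop (lenStr : Nat) : List (List Char) → Nat → List Char → List Char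
  | [], _, ss => ss
  | w :: ws, total, ss =>
    let total' := total + w.length
    let ss' := ss ++ w
    if lenStr ≤ total' then ss' else pvALoop lenStr ws total' ss'

def isPrefixString_best_speed (s : String) (words : List String) : Bool :=
  let cs := s.toList
  decide (pvALoop cs.length (words.map String.toList) 0 [] = cs)

-- ===== PORT B =====
-- B's loop: pointer i into s; compare s[i:i+len(w)] to w, early False on mismatch; break when i >= len(s); return i == len(s).
def pvBLoop (cs : List Char) : List (List Char) → Nat → Bool
  | [], i => decide (i = cs.length)
  | w :: ws, i =>
    if PySem.List.slice cs (some (i : Int)) (some ((i : Int) + (w.length : Int))) ≠ w then false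
    else
      let i' := i + w.length
      if cs.length ≤ i' then decide (i' = cs.length) else pvBLoop cs ws i'

def isPrefixString_best_speed_alt (s : String) (words : List String) : Bool :=
  pvBLoop s.toList (words.map String.toList) 0

-- ===== PRECONDITION & SPEC =====
def Spec_isPrefixString_best_speed (s : String) (words : List String) (out : Bool) : Prop := out = isPrefixString_best_speed_alt s words
instance (s : String) (words : List String) (out : Bool) : Decidable (Spec_isPrefixString_best_speed s words out) := by unfold Spec_isPrefixString_best_speed; infer_instance

-- ===== CLAIM (what is proved, stated in full; the proofs are below) =====
def Claim_equal_isPrefixString_best_speed : Prop := ∀ (s : String) (words : List String), Dom_isPrefixString_best_speed s words → Spec_isPrefixString_best_speed s words (isPrefixString_best_speed s words)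

-- ===== LEMMAS AND PROOFS =====

-- A's loop only ever appends to ss: its result extends ss.
theorem pvALoop_extends (lenStr : Nat) (ws : List (List Char)) (total : Nat) (ss : List Char) :
    ∃ r, pvALoop lenStr ws total ss = ss ++ r := by
  induction ws generalizing total ss with
  | nil => exact ⟨[], by simp [pvALoop]⟩
  | cons w ws ih =>
    simp only [pvALoop]
    split
    · exact ⟨w, rfl⟩
    · obtain ⟨r, hr⟩ := ih (total + w.length) (ss ++ w)
      exact ⟨w ++ r, by simp [hr]⟩

-- Main invariant: with i positions of s already matched, B's loop decides whether A's loop result equals s.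
theorem pvLoop_eq (cs : List Char) (ws : List (List Char)) (i : Nat) (hi : i ≤ cs.length) :
    decide (pvALoop cs.length ws i (cs.take i) = cs) = pvBLoop cs ws i := by
  induction ws generalizing i with
  | nil =>
    simp only [pvALoop, pvBLoop]
    have : cs.take i = cs ↔ i = cs.length := by
      constructor
      · intro h
        have := congrArg List.length h
        simp at this
        omega
      · intro h; simp [h]
    simp [this]
  | cons w ws ih =>
    simp only [pvALoop, pvBLoop, PySem.List.slice_natCast_add]
    by_cases hm : (cs.drop i).take w.length = w
    · -- slice matches: the extended prefix is cs.take (i + w.length)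
      have hwlen : w.length ≤ cs.length - i := by
        have := congrArg List.length hm
        simp at this
        omega
      have hext : cs.take i ++ w = cs.take (i + w.length) := by
        rw [List.take_add, hm]
      simp only [hm, ne_eq, not_true_eq_false, if_false]
      by_cases hb : cs.length ≤ i + w.length
      · have hieq : i + w.length = cs.length := by omega
        simp [hext, hieq]
      · have hlt : ¬ cs.length ≤ i + w.length := hb
        simp only [hlt, if_false, hext]
        exact ih (i + w.length) (by omega)
    · -- slice mismatch: no extension of cs.take i ++ w can equal cs
      simp only [hm, ne_eq, not_false_eq_true, if_true]
      have hne : ∀ r, cs.take i ++ w ++ r ≠ cs := by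
        intro r habs
        by_cases hlong : i + w.length ≤ cs.length
        · apply hm
          have hlen : (cs.take i ++ w).length = i + w.length := by
            simp
            omega
          have h1 : cs.take i ++ w = cs.take (i + w.length) := by
            have h0 := congrArg (List.take (i + w.length)) habs
            rwa [List.take_left' hlen] at h0
          rw [List.take_add] at h1
          exact (List.append_cancel_left h1).symm
        · have hl := congrArg List.length habs
          simp at hl
          omega
      split
      · simp only [decide_eq_false_iff_not]
        intro habs
        exact hne [] (by simpa using habs)
      · obtain ⟨r, hr⟩ := pvALoop_extends cs.length ws (i + w.length) (cs.take i ++ w)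
        simp only [hr, decide_eq_false_iff_not]
        intro habs
        exact hne r (by simpa [List.append_assoc] using habs)

-- ===== VERDICT (by name: the statement is the Claim_ definition above) =====
theorem isPrefixString_best_speed_spec : Claim_equal_isPrefixString_best_speed := by
  intro s words _
  unfold Spec_isPrefixString_best_speed isPrefixString_best_speed isPrefixString_best_speed_alt
  simpa using pvLoop_eq s.toList (words.map String.toList) 0 (by omega)
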